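-- pv_equiv track=rewrite | github.com/argocdwkflow/Troubleshooting_5 | export_AK_v3.0.py | parse_info
-- ===== SOURCE A (Python) =====
-- from typing import Dict, List
--
-- def parse_info(text: str) -> Dict[str, str]:
--     data: Dict[str, str] = {}
--     for line in text.splitlines():
--         if ":" not in line:
--             continue
--         left, right = line.split(":", 1)
--         key = left.strip()
--         val = right.strip()
--         if key not in data:
--             data[key] = val
--     return data
-- ===== SOURCE B (Python) =====
-- from typing import Dict
--
-- def parse_info(text: str) -> Dict[str, str]:
--     pairs = [(left.strip(), right.strip())
--              for left, right in (line.split(":", 1)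
--                                  for line in text.splitlines() if ":" in line)]
--     # dict() keeps the last value per key, so feeding the pairs reversed
--     # keeps the earliest one; the comprehension restores first-seen key order.
--     first_val = dict(reversed(pairs))
--     return {key: first_val[key] for key, _ in pairs}
-- ===== Notes on version B (the rewrite author's own statement) =====
-- stated objective: alternative
-- what changed: B is a three-stage pipeline instead of a guarded accumulation loop: it first extracts all stripped (key, value) pairs by comprehension, then builds one dict from the reversed pair list (so the earliest value per key survives), and finally re-emits the pairs as a dict comprehension to restore first-occurrence key order.
import Mathlib
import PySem

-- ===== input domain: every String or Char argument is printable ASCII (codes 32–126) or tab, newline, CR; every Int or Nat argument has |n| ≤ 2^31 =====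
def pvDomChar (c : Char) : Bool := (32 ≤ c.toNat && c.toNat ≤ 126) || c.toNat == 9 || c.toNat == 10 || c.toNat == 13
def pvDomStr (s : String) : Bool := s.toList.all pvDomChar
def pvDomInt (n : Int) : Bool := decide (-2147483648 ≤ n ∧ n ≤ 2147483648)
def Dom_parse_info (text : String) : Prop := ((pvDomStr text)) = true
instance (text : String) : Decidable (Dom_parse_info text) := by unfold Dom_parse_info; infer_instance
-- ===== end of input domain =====

-- B replaces A's guarded accumulation loop by a three-stage pipeline: extract all stripped
-- (key, value) pairs, build one dict from the reversed pair list (earliest value per key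
-- survives), then re-emit the pairs as a dict comprehension to restore first-seen key order.

-- ===== PORT A =====
-- A: forward loop over splitlines, insert only if the key is not yet present, return the dict.
def parse_info (text : String) : List (String × String) :=
  ((PySem.Str.splitlines text).foldl (fun (data : PySem.Dict String String) line =>
    if PySem.Str.isIn ":" line then
      match PySem.Str.splitMax? line ":" 1 with
      | some [left, right] =>
        let key := PySem.Str.strip left
        let val := PySem.Str.strip right
        if data.contains key then data else data.insert key val
      | _ => data  -- unreachable: split(":", 1) on a line containing ":" yields two pieces
    else data) PySem.Dict.empty).items

-- ===== PORT B =====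
-- B: pairs comprehension; dict of the reversed pairs; order-restoring dict comprehension.
def parse_info_alt (text : String) : List (String × String) :=
  let pairs := (PySem.Str.splitlines text).filterMap (fun line =>
    if PySem.Str.isIn ":" line then
      -- destructuring 'left, right = line.split(":", 1)'
      match PySem.Str.splitMax? line ":" 1 with
      | none => none  -- unreachable: the separator ":" is nonempty
      | some parts =>
        match parts with
        | left :: rest =>
          match rest with
          | right :: extra =>
            match extra with
            | [] => some (PySem.Str.strip left, PySem.Str.strip right)
            | _ :: _ => none  -- unreachable: split(":", 1) yields at most two pieces
          | [] => none  -- unreachable: a colon line splits into two pieces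
        | [] => none  -- unreachable: split always yields at least one piece
    else none)
  let first_val := PySem.Dict.ofList pairs.reverse
  (pairs.foldl (fun (d : PySem.Dict String String) p =>
      match first_val.get? p.1 with
      | some v => d.insert p.1 v
      | none => d  -- unreachable: every key of pairs occurs in first_val
      ) PySem.Dict.empty).items

-- ===== PRECONDITION & SPEC =====
def Spec_parse_info (text : String) (out : List (String × String)) : Prop := out = parse_info_alt text
instance (text : String) (out : List (String × String)) : Decidable (Spec_parse_info text out) := by unfold Spec_parse_info; infer_instance

-- ===== CLAIM (what is proved, stated in full; the proofs are below) =====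
def Claim_equal_parse_info : Prop := ∀ (text : String), Dom_parse_info text → Spec_parse_info text (parse_info text)

-- ===== LEMMAS AND PROOFS =====

-- the shared per-line parse: `some (key, val)` for a colon line, `none` otherwise
def pvParseLine (line : String) : Option (String × String) :=
  if PySem.Str.isIn ":" line then
    match PySem.Str.splitMax? line ":" 1 with
    | some [left, right] => some (PySem.Str.strip left, PySem.Str.strip right)
    | _ => none
  else none

-- value at the FIRST occurrence of key k in the pair list
def pvFirst (P : List (String × String)) (k : String) : Option String :=
  (P.find? (fun p => p.1 == k)).map (·.2)

-- A's step factors through pvParseLine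
lemma pvStepA (d : PySem.Dict String String) (line : String) :
    (if PySem.Str.isIn ":" line then
      match PySem.Str.splitMax? line ":" 1 with
      | some [left, right] =>
        let key := PySem.Str.strip left
        let val := PySem.Str.strip right
        if d.contains key then d else d.insert key val
      | _ => d
    else d)
    = (match pvParseLine line with
       | some kv => if d.contains kv.1 then d else d.insert kv.1 kv.2
       | none => d) := by
  unfold pvParseLine
  split
  · rcases h : PySem.Str.splitMax? line ":" 1 with _ | ⟨_ | ⟨a, _ | ⟨b, _ | _⟩⟩⟩ <;> simp
  · simp

-- A's option-step fold over the lines equals the guarded-insert fold over the parsed pairs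
lemma pvFoldA (l : List String) (d : PySem.Dict String String) :
    l.foldl (fun data line =>
        match pvParseLine line with
        | some kv => if data.contains kv.1 then data else data.insert kv.1 kv.2
        | none => data) d
      = (l.filterMap pvParseLine).foldl
          (fun d kv => if d.contains kv.1 then d else d.insert kv.1 kv.2) d := by
  induction l generalizing d with
  | nil => rfl
  | cons x xs ih => cases h : pvParseLine x <;> simp [h, ih]

-- lookup in a dict built by insert-folding a pair list: last insertion wins
lemma pvGetFoldl (l : List (String × String)) (d : PySem.Dict String String) (k : String) :
    (l.foldl (fun d p => d.insert p.1 p.2) d).get? k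
      = ((l.reverse.find? (fun p => p.1 == k)).map (·.2)).or (d.get? k) := by
  induction l generalizing d with
  | nil => simp
  | cons p t ih =>
    rw [List.foldl_cons, ih, List.reverse_cons, List.find?_append, Option.map_or,
      Option.or_assoc, PySem.Dict.get?_insert]
    by_cases hk : k = p.1
    · have h1 : List.find? (fun q => q.1 == k) [p] = some p := by
        simp [List.find?, hk]
      rw [h1, if_pos hk]
      rfl
    · have h1 : List.find? (fun q => q.1 == k) [p] = none := by
        rw [List.find?_eq_none]
        intro q hq
        simp only [List.mem_singleton] at hq
        subst hq
        simp only [beq_iff_eq]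
        exact fun h => hk h.symm
      rw [h1, if_neg hk]
      rfl

-- inserting a value the dict already holds at that key changes nothing
lemma pvInsertNoop (d : PySem.Dict String String) (k : String) (v : String)
    (hnd : d.keys.Nodup) (hv : d.get? k = some v) : d.insert k v = d := by
  have hc : d.contains k = true := by
    rw [PySem.Dict.contains_eq_isSome_get?, hv]; rfl
  apply PySem.Dict.ext
  rw [PySem.Dict.items_insert_of_contains _ _ hc]
  conv_rhs => rw [← List.map_id d.items]
  apply List.map_congr_left
  intro q hq
  obtain ⟨a, b⟩ := q
  by_cases h : a = k
  · subst h
    have hb := PySem.Dict.get?_of_mem_items _ hq hnd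
    rw [hv] at hb
    have hbv : v = b := by injection hb
    simp [← hbv]
  · simp [h]

-- the heart: A's guarded-insert fold equals the insert-first-value fold, as long as
-- F returns, for every key still absent from d, the value at its first occurrence
lemma pvBoth (F : String → Option String) (s : List (String × String))
    (d : PySem.Dict String String) (hnd : d.keys.Nodup)
    (H : ∀ p ∈ s, F p.1 = if d.contains p.1 then d.get? p.1 else pvFirst s p.1) :
    s.foldl (fun d kv => if d.contains kv.1 then d else d.insert kv.1 kv.2) d
      = s.foldl (fun d kv =>
          match F kv.1 with
          | some v => d.insert kv.1 v
          | none => d) d := by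
  induction s generalizing d with
  | nil => rfl
  | cons p t ih =>
    rw [List.foldl_cons, List.foldl_cons]
    by_cases hc : d.contains p.1 = true
    · have hF : F p.1 = d.get? p.1 := by simpa [hc] using H p (List.mem_cons_self ..)
      obtain ⟨v, hv⟩ : ∃ v, d.get? p.1 = some v := by
        have h2 := PySem.Dict.contains_eq_isSome_get? d p.1
        rw [hc] at h2
        exact Option.isSome_iff_exists.mp h2.symm
      rw [if_pos hc, hF, hv]
      dsimp only
      rw [pvInsertNoop d p.1 v hnd hv]
      apply ih d hnd
      intro q hq
      have hH := H q (List.mem_cons_of_mem _ hq)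
      by_cases hqc : d.contains q.1 = true
      · simpa [hqc] using hH
      · have hne : q.1 ≠ p.1 := fun h => by rw [h] at hqc; exact hqc hc
        rw [if_neg (by simp [hqc])] at hH ⊢
        rw [hH]
        unfold pvFirst
        rw [List.find?_cons_of_neg (by simp only [beq_iff_eq]; exact fun h => hne h.symm)]
    · have hF : F p.1 = some p.2 := by
        have h2 := H p (List.mem_cons_self ..)
        rw [if_neg hc] at h2
        rw [h2]
        unfold pvFirst
        rw [List.find?_cons_of_pos (by simp)]
        rfl
      rw [if_neg hc, hF]
      dsimp only
      apply ih (d.insert p.1 p.2) (PySem.Dict.nodup_keys_insert _ _ _ hnd)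
      intro q hq
      by_cases hqp : q.1 = p.1
      · have hc' : (d.insert p.1 p.2).contains q.1 = true := by
          rw [hqp]; exact PySem.Dict.contains_insert_self _ _ _
        rw [if_pos hc', hqp, PySem.Dict.get?_insert_self]
        exact hF
      · have hg : (d.insert p.1 p.2).get? q.1 = d.get? q.1 :=
          PySem.Dict.get?_insert_of_ne _ _ hqp
        have hcc : (d.insert p.1 p.2).contains q.1 = d.contains q.1 := by
          rw [PySem.Dict.contains_insert]
          simp [hqp]
        have hH := H q (List.mem_cons_of_mem _ hq)
        by_cases hqc : d.contains q.1 = true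
        · rw [if_pos (by rw [hcc]; exact hqc), hg]
          simpa [hqc] using hH
        · rw [if_neg (by rw [hcc]; simp [hqc])]
          rw [if_neg (by simp [hqc])] at hH
          rw [hH]
          unfold pvFirst
          rw [List.find?_cons_of_neg (by simp only [beq_iff_eq]; exact fun h => hqp h.symm)]


-- B's destructuring parse is the shared per-line parse
lemma pvLineB (line : String) :
    (if PySem.Str.isIn ":" line then
      match PySem.Str.splitMax? line ":" 1 with
      | none => none
      | some parts =>
        match parts with
        | left :: rest =>
          match rest with
          | right :: extra =>
            match extra with
            | [] => some (PySem.Str.strip left, PySem.Str.strip right)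
            | _ :: _ => none
          | [] => none
        | [] => none
    else none)
    = pvParseLine line := by
  unfold pvParseLine
  split
  · rcases h : PySem.Str.splitMax? line ":" 1 with _ | ⟨_ | ⟨a, _ | ⟨b, _ | _⟩⟩⟩ <;> simp
  · rfl

-- ===== VERDICT (by name: the statement is the Claim_ definition above) =====
theorem parse_info_spec : Claim_equal_parse_info := by
  intro text _
  show parse_info text = parse_info_alt text
  set P := (PySem.Str.splitlines text).filterMap pvParseLine with hP
  have hfun : (fun line =>
      if PySem.Str.isIn ":" line then
        match PySem.Str.splitMax? line ":" 1 with
        | none => none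
        | some parts =>
          match parts with
          | left :: rest =>
            match rest with
            | right :: extra =>
              match extra with
              | [] => some (PySem.Str.strip left, PySem.Str.strip right)
              | _ :: _ => none
            | [] => none
          | [] => none
      else none) = pvParseLine := funext pvLineB
  have hBdef : parse_info_alt text
      = (P.foldl (fun (d : PySem.Dict String String) p =>
          match (PySem.Dict.ofList P.reverse).get? p.1 with
          | some v => d.insert p.1 v
          | none => d) PySem.Dict.empty).items := by
    unfold parse_info_alt
    rw [hfun]
  have hAdef : parse_info text
      = (P.foldl (fun (d : PySem.Dict String String) kv =>
          if d.contains kv.1 then d else d.insert kv.1 kv.2) PySem.Dict.empty).items := by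
    unfold parse_info
    rw [PySem.List.foldl_congr_mem _ _ _ _ (fun d' l _ => pvStepA d' l), pvFoldA]
  rw [hAdef, hBdef]
  congr 1
  apply pvBoth _ _ _ PySem.Dict.nodup_keys_empty
  intro p _
  rw [if_neg (by simp [PySem.Dict.contains_empty])]
  show (PySem.Dict.ofList P.reverse).get? p.1 = pvFirst P p.1
  unfold PySem.Dict.ofList PySem.Dict.update
  rw [pvGetFoldl]
  simp [pvFirst, PySem.Dict.get?_empty]
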